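-- pv_equiv track=rewrite | github.com/psfrench76/dolphin_tracker | src/utils/data_conversion.py | _deduplicate_tracks
-- ===== SOURCE A (Python) =====
-- def _deduplicate_tracks(tracks):
--     stats = {'duplicate_tracks_renumbered': 0}
--     seen_tracks = {}
--
--     for i, track in enumerate(tracks):
--         seen_tracks[track] = seen_tracks.get(track, 0) + 1
--         if seen_tracks[track] > 1:
--             tracks[i] = _first_unused_track_id(tracks)
--             stats['duplicate_tracks_renumbered'] += 1
--             seen_tracks[track] -= 1
--             seen_tracks[tracks[i]] = 1
--     return stats
--
-- def _first_unused_track_id(tracks):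
--     for i in range(1, len(tracks) + 2): # +2 because range is exclusive and if the tracks are sequential we want to return the next number
--         if i not in tracks:
--             return i
-- ===== SOURCE B (Python) =====
-- def _deduplicate_tracks(tracks):
--     stats = {'duplicate_tracks_renumbered': 0}
--     present = set(tracks)          # ids currently in use (only ever grows)
--     seen = set()                   # ids already kept at an earlier position
--     next_id = 1                    # monotone candidate for the smallest unused id
--     for i, track in enumerate(tracks):
--         if track in seen:
--             while next_id in present:
--                 next_id += 1
--             tracks[i] = next_id
--             present.add(next_id)
--             next_id += 1
--             stats['duplicate_tracks_renumbered'] += 1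
--         else:
--             seen.add(track)
--     return stats
-- ===== Notes on version B (the rewrite author's own statement) =====
-- stated objective: faster
-- what changed: B precomputes the set of present ids and a monotone next_id pointer, renumbering each duplicate in one pass, instead of A's per-duplicate rescan of the whole list from 1 with list-membership tests.
import Mathlib
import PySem

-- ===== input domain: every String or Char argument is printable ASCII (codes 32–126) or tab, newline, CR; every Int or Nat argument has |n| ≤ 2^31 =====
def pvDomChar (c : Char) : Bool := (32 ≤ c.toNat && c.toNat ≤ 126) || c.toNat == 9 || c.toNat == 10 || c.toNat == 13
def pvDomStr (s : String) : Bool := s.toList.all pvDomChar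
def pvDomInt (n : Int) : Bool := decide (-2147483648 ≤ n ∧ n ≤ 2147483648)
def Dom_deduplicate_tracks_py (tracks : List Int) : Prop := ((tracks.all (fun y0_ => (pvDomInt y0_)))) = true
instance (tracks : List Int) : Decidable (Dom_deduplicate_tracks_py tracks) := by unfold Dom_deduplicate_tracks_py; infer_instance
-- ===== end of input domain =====

-- B replaces A's per-duplicate rescans (first-unused id recomputed from 1 by scanning the whole
-- list, membership tested by a list scan) with a present-id set and a monotone next_id pointer.
-- A mutates `tracks` in place; B performs the same mutation; the equivalence proved here is about
-- the returned stats dict only.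

-- ===== PORT A =====
-- range(1, len(tracks)+2), searched in order; the search always succeeds (n+1 distinct
-- candidates, at most n distinct values in tracks), so the `.getD 0` default is unreachable.
def first_unused_track_id (tracks : List Int) : Int :=
  (((List.range (tracks.length + 1)).map (fun k => ((k + 1 : Nat) : Int))).find?
      (fun i => !(tracks.contains i))).getD 0

-- one iteration of A's `for i, track in enumerate(tracks)` body; state = (tracks, seen_tracks, count).
-- enumerate over the live list yields the current value at index i (always in range, so getD is exact).
def dedupA_step (st : List Int × PySem.Dict Int Int × Int) (i : Nat) :
    List Int × PySem.Dict Int Int × Int :=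
  let L := st.1
  let seen := st.2.1
  let c := st.2.2
  let track := L.getD i 0
  let seen1 := seen.insert track (seen.getD track 0 + 1)
  if seen1.getD track 0 > 1 then
    let L' := L.set i (first_unused_track_id L)   -- tracks[i] = _first_unused_track_id(tracks)
    let seen2 := seen1.insert track (seen1.getD track 0 - 1)
    let seen3 := seen2.insert (L'.getD i 0) 1     -- seen_tracks[tracks[i]] = 1
    (L', seen3, c + 1)
  else
    (L, seen1, c)

def deduplicate_tracks_py (tracks : List Int) : List (String × Int) :=
  let st := (List.range tracks.length).foldl dedupA_step (tracks, PySem.Dict.empty, 0)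
  [("duplicate_tracks_renumbered", st.2.2)]

-- ===== PORT B =====
-- `while next_id in present: next_id += 1`; each passing test consumes a distinct member of
-- `present` that is ≥ next_id, so fuel = present.length + 1 suffices and the 0-fuel default is unreachable.
def advance_id (present : PySem.Set Int) (ptr : Int) : Nat → Int
  | 0 => ptr
  | fuel + 1 => if present.contains ptr then advance_id present (ptr + 1) fuel else ptr

-- Source B's loop, recursing over the remaining elements (enumerate reads index i before the body
-- writes it, so the yielded value is the current list's value at i = the original value there).
def dedupB_loop (rest : List Int) (i : Nat) (L : List Int)
    (present seen : PySem.Set Int) (next_id cnt : Int) : Int :=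
  match rest with
  | [] => cnt
  | track :: rest =>
    if seen.contains track then
      let nid := advance_id present next_id (present.length + 1)
      dedupB_loop rest (i + 1) (L.set i nid) (present.add nid) seen (nid + 1) (cnt + 1)
    else
      dedupB_loop rest (i + 1) L present (seen.add track) next_id cnt

def deduplicate_tracks_py_alt (tracks : List Int) : List (String × Int) :=
  [("duplicate_tracks_renumbered",
    dedupB_loop tracks 0 tracks (PySem.Set.ofList tracks) PySem.Set.empty 1 0)]

-- ===== PRECONDITION & SPEC =====
def Spec_deduplicate_tracks_py (tracks : List Int) (out : List (String × Int)) : Prop := out = deduplicate_tracks_py_alt tracks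
instance (tracks : List Int) (out : List (String × Int)) : Decidable (Spec_deduplicate_tracks_py tracks out) := by unfold Spec_deduplicate_tracks_py; infer_instance

-- ===== CLAIM (what is proved, stated in full; the proofs are below) =====
def Claim_equal_deduplicate_tracks_py : Prop := ∀ (tracks : List Int), Dom_deduplicate_tracks_py tracks → Spec_deduplicate_tracks_py tracks (deduplicate_tracks_py tracks)

-- ===== LEMMAS AND PROOFS =====

-- number of positions whose value already occurred before it (pre = values seen so far)
def dcAux : List Int → List Int → Int
  | _, [] => 0
  | pre, t :: rest => (if t ∈ pre then 1 else 0) + dcAux (t :: pre) rest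

theorem dcAux_perm (pre pre' : List Int) (xs : List Int)
    (h : ∀ v, v ∈ pre ↔ v ∈ pre') : dcAux pre xs = dcAux pre' xs := by
  induction xs generalizing pre pre' with
  | nil => rfl
  | cons t rest ih =>
    simp only [dcAux, h t]
    rw [ih (t :: pre) (t :: pre') (by intro v; simp [h v])]

theorem dcAux_append_singleton (pre xs : List Int) (t : Int) :
    dcAux pre (xs ++ [t]) = dcAux pre xs + (if t ∈ pre ∨ t ∈ xs then 1 else 0) := by
  induction xs generalizing pre with
  | nil => simp [dcAux]
  | cons x rest ih =>
    simp only [List.cons_append, dcAux, ih (x :: pre)]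
    have : (t ∈ x :: pre ∨ t ∈ rest) ↔ (t ∈ pre ∨ t ∈ x :: rest) := by
      simp; tauto
    rw [if_congr this rfl rfl]; ring

-- the candidate search in _first_unused_track_id always finds an id not in the list
theorem first_unused_not_mem (L : List Int) : first_unused_track_id L ∉ L := by
  set cands := (List.range (L.length + 1)).map (fun k => ((k + 1 : Nat) : Int)) with hcands
  have hex : ∃ x ∈ cands, x ∉ L := by
    by_contra h
    simp only [not_exists, not_and, not_not] at h
    have hnd : cands.Nodup := by
      refine List.Nodup.map ?_ (List.nodup_range)
      intro a b hab
      simp only [Nat.cast_inj] at hab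
      omega
    have hsub : cands.toFinset ⊆ L.toFinset := by
      intro x hx
      simp only [List.mem_toFinset] at hx ⊢
      exact h x hx
    have h1 : cands.toFinset.card = L.length + 1 := by
      rw [List.toFinset_card_of_nodup hnd, hcands]
      simp
    have h2 : L.toFinset.card ≤ L.length := L.toFinset_card_le
    have := Finset.card_le_card hsub
    omega
  obtain ⟨x, hxc, hxL⟩ := hex
  unfold first_unused_track_id
  rw [← hcands]
  cases hf : cands.find? (fun i => !(L.contains i)) with
  | none =>
    exfalso
    have := List.find?_eq_none.mp hf x hxc
    simp [hxL] at this
  | some fresh =>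
    have hp := List.find?_some hf
    simp only [Bool.not_eq_eq_eq_not, Bool.not_true, List.contains_eq_mem,
      decide_eq_false_iff_not] at hp
    simpa using hp

-- invariance of a foldl over List.range
theorem foldl_range_inv {σ : Type} (f : σ → Nat → σ) (P : Nat → σ → Prop) (n : Nat) (init : σ)
    (h0 : P 0 init) (hs : ∀ i s, i < n → P i s → P (i + 1) (f s i)) :
    P n ((List.range n).foldl f init) := by
  induction n with
  | zero => simpa using h0
  | succ n ih =>
    rw [List.range_succ, List.foldl_append]
    exact hs n _ (Nat.lt_succ_self n) (ih (fun i s hi => hs i s (Nat.lt_succ_of_lt hi)))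

-- the loop invariant for A
def InvA (tracks : List Int) (i : Nat) (st : List Int × PySem.Dict Int Int × Int) : Prop :=
  st.1.length = tracks.length ∧
  st.1.drop i = tracks.drop i ∧
  (∀ v ∈ tracks.drop i, (v ∈ st.1.take i ↔ v ∈ tracks.take i)) ∧
  (∀ v, st.2.1.getD v 0 = if v ∈ st.1.take i then 1 else 0) ∧
  st.2.2 = dcAux [] (tracks.take i)

theorem take_succ_set {α : Type} (L : List α) (i : Nat) (v : α) (h : i < L.length) :
    (L.set i v).take (i + 1) = L.take i ++ [v] := by
  rw [List.set_eq_take_append_cons_drop, if_pos h, List.take_append,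
    List.take_of_length_le (by rw [List.length_take]; omega)]
  congr 1
  have h1 : i + 1 - (L.take i).length = 1 := by rw [List.length_take]; omega
  rw [h1]
  rfl

theorem take_succ_getElem {α : Type} (L : List α) (i : Nat) (h : i < L.length) :
    L.take (i + 1) = L.take i ++ [L[i]] := by
  rw [List.take_add_one, List.getElem?_eq_getElem h]
  rfl

theorem dedupA_inv (tracks : List Int) :
    InvA tracks tracks.length
      ((List.range tracks.length).foldl dedupA_step (tracks, PySem.Dict.empty, 0)) := by
  apply foldl_range_inv dedupA_step (InvA tracks) tracks.length
  · refine ⟨rfl, rfl, by simp, by simp [PySem.Dict.getD_empty], by simp [dcAux]⟩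
  · rintro i ⟨L, seen, c⟩ hi ⟨hlen, hdrop, htake, hseen, hc⟩
    simp only at hlen hdrop htake hseen hc
    have hiL : i < L.length := hlen ▸ hi
    have hLi : L[i] = tracks[i] := by
      have := congrArg (fun l => l[0]?) hdrop
      simpa [List.getElem?_drop, List.getElem?_eq_getElem, hiL, hi] using this
    have hdrop1 : L.drop (i + 1) = tracks.drop (i + 1) := by
      have := congrArg List.tail hdrop
      simpa [List.tail_drop] using this
    have hdropcons : tracks.drop i = tracks[i] :: tracks.drop (i + 1) :=
      List.drop_eq_getElem_cons hi
    obtain ⟨t, ht⟩ : ∃ t, L.getD i 0 = t := ⟨_, rfl⟩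
    have htval : t = tracks[i] := by rw [← ht, List.getD_eq_getElem _ _ hiL, hLi]
    have htmemdrop : t ∈ tracks.drop i := by
      rw [hdropcons, htval]
      exact List.mem_cons_self
    have hcond : t ∈ L.take i ↔ t ∈ tracks.take i := htake t htmemdrop
    have htrtake : tracks.take (i + 1) = tracks.take i ++ [t] := by
      rw [take_succ_getElem tracks i hi, htval]
    have hcnt : dcAux [] (tracks.take (i + 1)) =
        dcAux [] (tracks.take i) + (if t ∈ tracks.take i then 1 else 0) := by
      rw [htrtake, dcAux_append_singleton]; simp
    simp only [dedupA_step]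
    rw [ht, PySem.Dict.getD_insert_self]
    by_cases hmem : t ∈ L.take i
    · -- duplicate: renumber
      have hmemT : t ∈ tracks.take i := hcond.mp hmem
      have hge : seen.getD t 0 = 1 := by rw [hseen t, if_pos hmem]
      rw [if_pos (by omega)]
      obtain ⟨fresh, hfresh⟩ : ∃ f, first_unused_track_id L = f := ⟨_, rfl⟩
      rw [hfresh]
      have hfreshL : fresh ∉ L := hfresh ▸ first_unused_not_mem L
      have htL : t ∈ L := by rw [htval, ← hLi]; exact L.getElem_mem hiL
      have htf : t ≠ fresh := fun h => hfreshL (h ▸ htL)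
      have hget' : (L.set i fresh).getD i 0 = fresh := by
        rw [List.getD_eq_getElem _ _ (by simpa using hiL)]
        simp
      have htake' : (L.set i fresh).take (i + 1) = L.take i ++ [fresh] :=
        take_succ_set L i fresh hiL
      refine ⟨by simpa using hlen, ?_, ?_, ?_, ?_⟩
      · rw [List.drop_set, if_pos (by omega)]
        exact hdrop1
      · intro v hv
        have hvL : v ∈ L := List.mem_of_mem_drop (hdrop1 ▸ hv : v ∈ L.drop (i + 1))
        have hvf : v ≠ fresh := fun h => hfreshL (h ▸ hvL)
        have hvdrop : v ∈ tracks.drop i := by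
          rw [hdropcons]
          exact List.mem_cons_of_mem _ hv
        rw [htake', htrtake]
        simp only [List.mem_append, List.mem_singleton]
        constructor
        · rintro (h | h)
          · exact Or.inl ((htake v hvdrop).mp h)
          · exact absurd h hvf
        · rintro (h | h)
          · exact Or.inl ((htake v hvdrop).mpr h)
          · exact Or.inl (((htake v hvdrop).mpr (h ▸ hmemT)))
      · intro v
        rw [hget', htake']
        simp only [PySem.Dict.getD_insert, hseen]
        by_cases hvf : v = fresh
        · subst hvf; simp
        · by_cases hvt : v = t
          · subst hvt
            simp [hvf, hmem]
          · simp [hvf, hvt]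
      · simp only [hc, hcnt, if_pos hmemT]
    · -- first occurrence: keep
      have hmemT : t ∉ tracks.take i := fun h => hmem (hcond.mpr h)
      have hge : seen.getD t 0 = 0 := by rw [hseen t, if_neg hmem]
      rw [if_neg (by omega)]
      have htake' : L.take (i + 1) = L.take i ++ [t] := by
        rw [take_succ_getElem L i hiL, hLi, ← htval]
      refine ⟨hlen, hdrop1, ?_, ?_, ?_⟩
      · intro v hv
        have hvdrop : v ∈ tracks.drop i := by
          rw [hdropcons]
          exact List.mem_cons_of_mem _ hv
        rw [htake', htrtake]
        simp only [List.mem_append, List.mem_singleton]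
        exact or_congr (htake v hvdrop) Iff.rfl
      · intro v
        rw [htake']
        simp only [PySem.Dict.getD_insert, hseen]
        by_cases hvt : v = t
        · subst hvt; simp [hmem]
        · simp [hvt]
      · simp only [hc, hcnt, if_neg hmemT]; ring
  
theorem dedupA_count (tracks : List Int) :
    deduplicate_tracks_py tracks = [("duplicate_tracks_renumbered", dcAux [] tracks)] := by
  have h := dedupA_inv tracks
  obtain ⟨-, -, -, -, hc⟩ := h
  unfold deduplicate_tracks_py
  simp only [List.take_length] at hc
  exact congrArg (fun z => [("duplicate_tracks_renumbered", z)]) hc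

theorem dedupB_count (rest : List Int) (pre : List Int) :
    ∀ (i : Nat) (L : List Int) (present seen : PySem.Set Int) (nid cnt : Int),
      (∀ v, v ∈ seen ↔ v ∈ pre) →
      dedupB_loop rest i L present seen nid cnt = cnt + dcAux pre rest := by
  induction rest generalizing pre with
  | nil => intro i L present seen nid cnt _; simp [dedupB_loop, dcAux]
  | cons t rest ih =>
    intro i L present seen nid cnt hseen
    have hcont : seen.contains t = true ↔ t ∈ pre := by
      rw [PySem.Set.contains_iff]; exact hseen t
    by_cases hmem : t ∈ pre
    · rw [dedupB_loop, if_pos (hcont.mpr hmem)]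
      rw [ih pre _ _ _ _ _ _ hseen]
      simp only [dcAux, if_pos hmem]
      have hperm : ∀ v : Int, v ∈ t :: pre ↔ v ∈ pre := by
        intro v
        constructor
        · intro h
          rcases List.mem_cons.mp h with rfl | h
          · exact hmem
          · exact h
        · exact fun h => List.mem_cons_of_mem t h
      rw [dcAux_perm (t :: pre) pre rest hperm]
      ring
    · rw [dedupB_loop, if_neg (by rw [hcont]; exact hmem)]
      rw [ih (t :: pre) _ _ _ _ _ _ (by intro v; rw [PySem.Set.mem_add, hseen v, List.mem_cons]; tauto)]
      simp [dcAux, hmem]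

theorem dedupB_eq (tracks : List Int) :
    deduplicate_tracks_py_alt tracks = [("duplicate_tracks_renumbered", dcAux [] tracks)] := by
  unfold deduplicate_tracks_py_alt
  rw [dedupB_count tracks [] 0 tracks _ _ 1 0 (by simp [PySem.Set.empty])]
  simp

-- ===== VERDICT (by name: the statement is the Claim_ definition above) =====
theorem deduplicate_tracks_py_spec : Claim_equal_deduplicate_tracks_py := by
  intro tracks _
  unfold Spec_deduplicate_tracks_py
  rw [dedupA_count, dedupB_eq]
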